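-- pv_equiv track=rewrite | github.com/pseoane/basf-challenge | challenge2.py | number_of_equal_colors
-- ===== SOURCE A (Python) =====
-- def change_subset_representation(subset):
--     return (subset.count("r"), subset.count("g"), subset.count("b"))
--
-- def number_of_equal_colors(array):
--     # Subsets whose length cannot be divided by 3 will never have an equal number of colors,
--     # so in order to optimize the algorithm we iterate the array starting from 3 and with step 3
--     for subset_length in range(3, len(array) + 1, 3):
--         subsets = []
--         for i in range(0, len(array), subset_length):
--             subsets.append(change_subset_representation(array[i:i+subset_length]))
--
--         # Check if all subsets have equal color representations. As subset_length starts
--         # from the minimum possible subset length (3), once all subsets of subset_length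
--         # have equal color representations, it means that len(subsets) is the maximum
--         # number of subsets into which the array can be divided
--         if all(element[0] == element[1] and element[0] == element[2] for element in subsets):
--             return len(subsets)
--     return 0
-- ===== SOURCE B (Python) =====
-- def number_of_equal_colors(array):
--     # Prefix counts of 'r'/'g'/'b' make each chunk's balance check O(1),
--     # so trying all chunk lengths costs O(n log n) instead of A's O(n^2).
--     n = len(array)
--     pr = [0]
--     pg = [0]
--     pb = [0]
--     for c in array:
--         pr.append(pr[-1] + (c == 'r'))
--         pg.append(pg[-1] + (c == 'g'))
--         pb.append(pb[-1] + (c == 'b'))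
--     for length in range(3, n + 1, 3):
--         if all(pr[min(i + length, n)] - pr[i] == pg[min(i + length, n)] - pg[i]
--                and pr[min(i + length, n)] - pr[i] == pb[min(i + length, n)] - pb[i]
--                for i in range(0, n, length)):
--             return -(-n // length)
--     return 0
-- ===== Notes on version B (the rewrite author's own statement) =====
-- stated objective: faster
-- what changed: Replaces recounting r/g/b inside every chunk slice (O(n) per chunk, O(n) per candidate length) with three prefix-count arrays built once, so each chunk's balance check is O(1) and the candidate-length sweep costs O(n/length) each, O(n log n) total.
import Mathlib
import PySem

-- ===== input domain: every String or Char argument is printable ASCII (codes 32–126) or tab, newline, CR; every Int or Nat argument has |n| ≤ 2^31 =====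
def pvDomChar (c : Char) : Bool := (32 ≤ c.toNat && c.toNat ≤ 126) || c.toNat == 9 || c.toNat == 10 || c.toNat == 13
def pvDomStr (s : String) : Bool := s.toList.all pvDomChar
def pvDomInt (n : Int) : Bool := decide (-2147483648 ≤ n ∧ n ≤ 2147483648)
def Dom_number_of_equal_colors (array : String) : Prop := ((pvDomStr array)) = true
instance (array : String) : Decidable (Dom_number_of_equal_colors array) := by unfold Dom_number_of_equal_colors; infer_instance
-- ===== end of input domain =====

-- B replaces A's per-chunk slice recounting by prefix counts of 'r'/'g'/'b' built once,
-- making each chunk's balance check O(1); a timing run decides the speed label.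

-- ===== PORT A =====
-- change_subset_representation(subset): counts via str.count
def pvRep (s : List Char) : Int × Int × Int :=
  ((PySem.Chars.count s ['r'] : Int), (PySem.Chars.count s ['g'] : Int), (PySem.Chars.count s ['b'] : Int))

-- the outer 'for subset_length in range(3, len(array)+1, 3)' with its early return;
-- the inner append loop over range(0, len(array), subset_length) is the map
def pvALoop (l : List Char) : List Int → Int
  | [] => 0
  | L :: rest =>
      let subsets := (PySem.List.pyRange 0 (l.length : Int) L).map
        (fun i => pvRep (PySem.List.slice l (some i) (some (i + L))))
      if subsets.all (fun e => e.1 == e.2.1 && e.1 == e.2.2) then (subsets.length : Int)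
      else pvALoop l rest

def number_of_equal_colors (array : String) : Int :=
  pvALoop array.toList (PySem.List.pyRange 3 ((array.toList.length : Int) + 1) 3)

-- ===== PORT B =====
-- the prefix-count list pr/pg/pb: [0] extended by pr[-1] + (c == ch) for each character
def pvPrefix (ch : Char) (l : List Char) : List Int :=
  l.scanl (fun a c => a + (if c == ch then 1 else 0)) 0

-- the outer 'for length in range(3, n+1, 3)' with its early return; 'all(... for i in
-- range(0, n, length))' is the .all; indices are always in range, so pr[j] is pyGetD pr j 0
def pvBLoop (n : Int) (pr pg pb : List Int) : List Int → Int
  | [] => 0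
  | L :: rest =>
      if (PySem.List.pyRange 0 n L).all (fun i =>
            (PySem.List.pyGetD pr (min (i + L) n) 0 - PySem.List.pyGetD pr i 0
               == PySem.List.pyGetD pg (min (i + L) n) 0 - PySem.List.pyGetD pg i 0)
            && (PySem.List.pyGetD pr (min (i + L) n) 0 - PySem.List.pyGetD pr i 0
               == PySem.List.pyGetD pb (min (i + L) n) 0 - PySem.List.pyGetD pb i 0))
      then -(PySem.Int.floordiv (-n) L)
      else pvBLoop n pr pg pb rest

def number_of_equal_colors_alt (array : String) : Int :=
  let l := array.toList
  let n : Int := (l.length : Int)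
  pvBLoop n (pvPrefix 'r' l) (pvPrefix 'g' l) (pvPrefix 'b' l)
    (PySem.List.pyRange 3 (n + 1) 3)

-- ===== PRECONDITION & SPEC =====
def Spec_number_of_equal_colors (array : String) (out : Int) : Prop := out = number_of_equal_colors_alt array
instance (array : String) (out : Int) : Decidable (Spec_number_of_equal_colors array out) := by unfold Spec_number_of_equal_colors; infer_instance

-- ===== CLAIM (what is proved, stated in full; the proofs are below) =====
def Claim_equal_number_of_equal_colors : Prop := ∀ (array : String), Dom_number_of_equal_colors array → Spec_number_of_equal_colors array (number_of_equal_colors array)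

-- ===== LEMMAS AND PROOFS =====

-- Python's str.count with a single-character needle is the character count
theorem chars_count_go_single (c : Char) :
    ∀ (fuel : Nat) (l : List Char) (acc : Nat), l.length ≤ fuel →
      PySem.Chars.count.go [c] fuel l acc = acc + l.count c := by
  intro fuel
  induction fuel with
  | zero =>
    intro l acc h
    have : l = [] := by cases l <;> simp_all
    simp [this, PySem.Chars.count.go]
  | succ f ih =>
    intro l acc h
    cases l with
    | nil => simp [PySem.Chars.count.go]
    | cons x t =>
      rw [PySem.Chars.count.go]
      by_cases hx : x = c
      · simp [List.isPrefixOf, hx, ih t (acc + 1) (by simpa using h)]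
        omega
      · simp [List.isPrefixOf, hx, Ne.symm hx, ih t acc (by simpa using h)]

theorem chars_count_single (c : Char) (l : List Char) :
    PySem.Chars.count l [c] = l.count c := by
  rw [PySem.Chars.count]
  simp [chars_count_go_single c l.length l 0 le_rfl]

theorem pvPrefix_getD_aux (ch : Char) :
    ∀ (l : List Char) (k : Nat) (a : Int), k ≤ l.length →
      (l.scanl (fun a c => a + (if c == ch then 1 else 0)) a).getD k 0
        = a + ((l.take k).count ch : Int) := by
  intro l
  induction l with
  | nil =>
    intro k a h
    have hk : k = 0 := by simpa using h
    simp [hk]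
  | cons x t ih =>
    intro k a h
    cases k with
    | zero => simp [List.scanl_cons]
    | succ k =>
      rw [List.scanl_cons]
      simp only [List.getD_cons_succ]
      simp only [List.take_succ_cons, List.count_cons]
      rw [ih k _ (by simpa using h)]
      by_cases hx : x = ch <;> simp [hx] <;> push_cast <;> ring

-- the k-th entry of the prefix-count list counts ch in the first k characters
theorem pvPrefix_getD (ch : Char) (l : List Char) (k : Nat) (hk : k ≤ l.length) :
    PySem.List.pyGetD (l.scanl (fun a c => a + (if c == ch then 1 else 0)) 0) (k : Int) 0
      = ((l.take k).count ch : Int) := by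
  rw [PySem.List.pyGetD_natCast]
  simpa using pvPrefix_getD_aux ch l k 0 hk

-- a chunk's count is the difference of two prefix counts
theorem chunk_count (ch : Char) (l : List Char) (i L : Nat) :
    ((List.take L (List.drop i l)).count ch : Int)
      = ((l.take (min (i + L) l.length)).count ch : Int) - ((l.take i).count ch : Int) := by
  have hsplit : l.take i ++ List.take L (List.drop i l) = l.take (i + L) := (List.take_add ..).symm
  have htake : l.take (i + L) = l.take (min (i + L) l.length) := by
    rcases le_or_gt (i + L) l.length with h | h
    · rw [min_eq_left h]
    · rw [min_eq_right (by omega), List.take_of_length_le (by omega), List.take_length]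
  have := congrArg (List.count ch) hsplit
  rw [List.count_append, htake] at this
  omega

-- the number of chunks is the ceiling division -(-n // L)
theorem chunks_len (n L : Int) (hL : 0 < L) (hn : L ≤ n) :
    ((PySem.List.pyRange 0 n L).length : Int) = -(PySem.Int.floordiv (-n) L) := by
  rw [PySem.List.pyRange_of_pos 0 n hL]
  have h0n : (0 : Int) < n := lt_of_lt_of_le hL hn
  simp only [List.length_map, List.length_range, if_pos h0n]
  set q : Int := (n - 0 + L - 1) / L with hq
  have hq0 : 0 ≤ q := Int.ediv_nonneg (by omega) (by omega)
  have hmod := Int.ediv_add_emod (n - 0 + L - 1) L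
  have hlt := Int.emod_lt_of_pos (n - 0 + L - 1) hL
  have hge := Int.emod_nonneg (n - 0 + L - 1) (ne_of_gt hL)
  rw [Int.toNat_of_nonneg hq0]
  rw [eq_comm, (PySem.Int.neg_floordiv_neg_eq_iff_of_pos hL : _ ↔ (q - 1) * L < n ∧ n ≤ q * L)]
  constructor
  · nlinarith [hmod, hlt]
  · nlinarith [hmod, hge]

-- per chunk start, A's balance test of the slice equals B's prefix-difference test
theorem cond_eq (l : List Char) (L : Int) (hL : 0 < L) (i : Int)
    (hi : i ∈ PySem.List.pyRange 0 (l.length : Int) L) :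
    (fun e : Int × Int × Int => e.1 == e.2.1 && e.1 == e.2.2)
        (pvRep (PySem.List.slice l (some i) (some (i + L))))
      = ((PySem.List.pyGetD (pvPrefix 'r' l) (min (i + L) (l.length : Int)) 0 - PySem.List.pyGetD (pvPrefix 'r' l) i 0
            == PySem.List.pyGetD (pvPrefix 'g' l) (min (i + L) (l.length : Int)) 0 - PySem.List.pyGetD (pvPrefix 'g' l) i 0)
         && (PySem.List.pyGetD (pvPrefix 'r' l) (min (i + L) (l.length : Int)) 0 - PySem.List.pyGetD (pvPrefix 'r' l) i 0
            == PySem.List.pyGetD (pvPrefix 'b' l) (min (i + L) (l.length : Int)) 0 - PySem.List.pyGetD (pvPrefix 'b' l) i 0)) := by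
  obtain ⟨h0, hn, -⟩ := (PySem.List.mem_pyRange_iff_of_pos hL i).mp hi
  obtain ⟨iN, rfl⟩ : ∃ m : Nat, i = (m : Int) := ⟨i.toNat, (Int.toNat_of_nonneg h0).symm⟩
  obtain ⟨LN, rfl⟩ : ∃ m : Nat, L = (m : Int) := ⟨L.toNat, (Int.toNat_of_nonneg (le_of_lt hL)).symm⟩
  have hiN : iN ≤ l.length := by exact_mod_cast le_of_lt hn
  have hmin : min ((iN : Int) + (LN : Int)) (l.length : Int) = ((min (iN + LN) l.length : Nat) : Int) := by
    push_cast; rfl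
  rw [hmin, PySem.List.slice_natCast_add]
  unfold pvRep pvPrefix
  rw [pvPrefix_getD 'r' l _ (min_le_right _ _), pvPrefix_getD 'g' l _ (min_le_right _ _),
      pvPrefix_getD 'b' l _ (min_le_right _ _),
      pvPrefix_getD 'r' l iN hiN, pvPrefix_getD 'g' l iN hiN, pvPrefix_getD 'b' l iN hiN]
  simp only [chars_count_single]
  rw [chunk_count 'r' l iN LN, chunk_count 'g' l iN LN, chunk_count 'b' l iN LN]

theorem pv_all_congr {α : Type} (xs : List α) (f g : α → Bool)
    (h : ∀ x ∈ xs, f x = g x) : xs.all f = xs.all g := by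
  induction xs with
  | nil => rfl
  | cons x t ih =>
    simp only [List.all_cons, h x (List.mem_cons_self ..),
      ih (fun y hy => h y (List.mem_cons_of_mem _ hy))]

theorem loops_eq (l : List Char) (Ls : List Int)
    (h : ∀ L ∈ Ls, 0 < L ∧ L ≤ (l.length : Int)) :
    pvALoop l Ls = pvBLoop (l.length : Int) (pvPrefix 'r' l) (pvPrefix 'g' l) (pvPrefix 'b' l) Ls := by
  induction Ls with
  | nil => rfl
  | cons L rest ih =>
    obtain ⟨hL, hLe⟩ := h L (List.mem_cons_self ..)
    rw [pvALoop, pvBLoop]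
    have hall : ((PySem.List.pyRange 0 (l.length : Int) L).map
          (fun i => pvRep (PySem.List.slice l (some i) (some (i + L))))).all
            (fun e => e.1 == e.2.1 && e.1 == e.2.2)
        = (PySem.List.pyRange 0 (l.length : Int) L).all (fun i =>
            (PySem.List.pyGetD (pvPrefix 'r' l) (min (i + L) (l.length : Int)) 0 - PySem.List.pyGetD (pvPrefix 'r' l) i 0
               == PySem.List.pyGetD (pvPrefix 'g' l) (min (i + L) (l.length : Int)) 0 - PySem.List.pyGetD (pvPrefix 'g' l) i 0)
            && (PySem.List.pyGetD (pvPrefix 'r' l) (min (i + L) (l.length : Int)) 0 - PySem.List.pyGetD (pvPrefix 'r' l) i 0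
               == PySem.List.pyGetD (pvPrefix 'b' l) (min (i + L) (l.length : Int)) 0 - PySem.List.pyGetD (pvPrefix 'b' l) i 0)) := by
      rw [List.all_map]
      exact pv_all_congr _ _ _ (fun i hi => cond_eq l L hL i hi)
    simp only [hall]
    split
    · rw [List.length_map]
      exact chunks_len (l.length : Int) L hL hLe
    · exact ih (fun L' hL' => h L' (List.mem_cons_of_mem _ hL'))

-- ===== VERDICT (by name: the statement is the Claim_ definition above) =====
theorem number_of_equal_colors_spec : Claim_equal_number_of_equal_colors := by
  intro array _
  unfold Spec_number_of_equal_colors number_of_equal_colors number_of_equal_colors_alt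
  apply loops_eq
  intro L hL
  have := (PySem.List.mem_pyRange_iff_of_pos (by norm_num) L).mp hL
  omega
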